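-- pv_equiv track=rewrite | github.com/KPCOFGS/DepGra | backend/cve.py | _cvss_vector_to_severity
-- ===== SOURCE A (Python) =====
-- def _cvss_vector_to_severity(vector: str) -> str | None:
--     """
--     Extract severity from a CVSS v3 vector string.
--     The vector doesn't directly contain severity, but we can extract
--     the base score if present, or infer from attack complexity.
--
--     Common CVSS v3.1 vector format:
--     CVSS:3.1/AV:N/AC:L/PR:N/UI:N/S:U/C:H/I:H/A:H
--
--     We compute a rough score from impact metrics.
--     """
--     if not vector or not vector.startswith("CVSS:"):
--         return None
--
--     metrics: dict[str, str] = {}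
--     parts = vector.split("/")
--     for part in parts:
--         if ":" in part:
--             key, val = part.split(":", 1)
--             metrics[key] = val
--
--     # Simple heuristic based on confidentiality, integrity, availability impact
--     impact_values = {"N": 0, "L": 1, "H": 3}
--     score = 0
--     for metric_key in ("C", "I", "A"):
--         score += impact_values.get(metrics.get(metric_key, "N"), 0)
--
--     # Adjust for attack vector and privileges
--     if metrics.get("AV") == "N":  # Network
--         score += 2
--     if metrics.get("PR") == "N":  # No privileges required
--         score += 1
--     if metrics.get("AC") == "L":  # Low complexity
--         score += 1
--
--     if score >= 10:
--         return "CRITICAL"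
--     elif score >= 7:
--         return "HIGH"
--     elif score >= 4:
--         return "MEDIUM"
--     elif score >= 1:
--         return "LOW"
--     return "UNKNOWN"
-- ===== SOURCE B (Python) =====
-- _POINTS = {
--     ("C", "L"): 1, ("C", "H"): 3,
--     ("I", "L"): 1, ("I", "H"): 3,
--     ("A", "L"): 1, ("A", "H"): 3,
--     ("AV", "N"): 2, ("PR", "N"): 1, ("AC", "L"): 1,
-- }
--
-- _LEVELS = ((10, "CRITICAL"), (7, "HIGH"), (4, "MEDIUM"), (1, "LOW"))
--
--
-- def _cvss_vector_to_severity(vector: str) -> str | None: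
--     if not vector or not vector.startswith("CVSS:"):
--         return None
--
--     metrics: dict[str, str] = {}
--     for part in vector.split("/"):
--         if ":" in part:
--             key, val = part.split(":", 1)
--             metrics[key] = val
--
--     score = sum(_POINTS.get(item, 0) for item in metrics.items())
--
--     for threshold, label in _LEVELS:
--         if score >= threshold:
--             return label
--     return "UNKNOWN"
-- ===== Notes on version B (the rewrite author's own statement) =====
-- stated objective: simpler
-- what changed: The three-key impact loop plus the three ad-hoc adjustment ifs are replaced by a single sum of one (metric, value) -> points table over the parsed metrics items, and the if/elif threshold chain by a first-match scan of a (threshold, label) list.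
import Mathlib
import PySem

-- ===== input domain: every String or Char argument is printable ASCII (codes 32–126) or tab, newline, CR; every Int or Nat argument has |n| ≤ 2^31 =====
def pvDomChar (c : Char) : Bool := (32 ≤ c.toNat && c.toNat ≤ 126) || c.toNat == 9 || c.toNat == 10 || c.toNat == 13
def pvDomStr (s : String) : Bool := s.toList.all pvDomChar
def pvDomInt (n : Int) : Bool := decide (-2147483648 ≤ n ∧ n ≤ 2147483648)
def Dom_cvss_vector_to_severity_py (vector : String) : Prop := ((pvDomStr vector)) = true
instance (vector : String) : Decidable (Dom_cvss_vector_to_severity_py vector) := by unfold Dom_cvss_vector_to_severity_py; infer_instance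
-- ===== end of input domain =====

-- B replaces A's three-key impact loop plus three adjustment ifs by one pass summing a single
-- (key, value) → points table over the parsed metrics, and the if/elif threshold chain by a
-- first-match scan of a (threshold, label) list; objective: simpler.

-- ===== PORT A =====
-- parse loop: metrics[key] = val for every part containing ":"
def pvMetricsA (vector : String) : PySem.Dict String String :=
  ((PySem.Str.split? vector "/").getD []).foldl (fun m part =>
    if PySem.Str.isIn ":" part then
      match PySem.Str.splitMax? part ":" 1 with
      | some (key :: val :: _) => m.insert key val
      | _ => m          -- unreachable: split(":", 1) of a part containing ":" has two pieces
    else m) PySem.Dict.empty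

-- the score: loop over ("C","I","A") then the three adjustment ifs
def pvScoreA (metrics : PySem.Dict String String) : Int :=
  let impact_values : PySem.Dict String Int :=
    PySem.Dict.ofList [("N", 0), ("L", 1), ("H", 3)]
  let score : Int := ["C", "I", "A"].foldl
    (fun s metric_key => s + impact_values.getD (metrics.getD metric_key "N") 0) 0
  let score := if metrics.get? "AV" = some "N" then score + 2 else score
  let score := if metrics.get? "PR" = some "N" then score + 1 else score
  if metrics.get? "AC" = some "L" then score + 1 else score

def cvss_vector_to_severity_py (vector : String) : Option String :=
  if vector = "" ∨ PySem.Str.startswith vector "CVSS:" = false then none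
  else
    let score := pvScoreA (pvMetricsA vector)
    if score ≥ 10 then some "CRITICAL"
    else if score ≥ 7 then some "HIGH"
    else if score ≥ 4 then some "MEDIUM"
    else if score ≥ 1 then some "LOW"
    else some "UNKNOWN"

-- ===== PORT B =====
def pvPoints : PySem.Dict (String × String) Int :=
  PySem.Dict.ofList
    [(("C", "L"), 1), (("C", "H"), 3),
     (("I", "L"), 1), (("I", "H"), 3),
     (("A", "L"), 1), (("A", "H"), 3),
     (("AV", "N"), 2), (("PR", "N"), 1), (("AC", "L"), 1)]

def pvLevels : List (Int × String) :=
  [(10, "CRITICAL"), (7, "HIGH"), (4, "MEDIUM"), (1, "LOW")]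

-- same parse loop as Source B's first half
def pvMetricsB (vector : String) : PySem.Dict String String :=
  ((PySem.Str.split? vector "/").getD []).foldl (fun m part =>
    if PySem.Str.isIn ":" part then
      match PySem.Str.splitMax? part ":" 1 with
      | some (key :: val :: _) => m.insert key val
      | _ => m
    else m) PySem.Dict.empty

def cvss_vector_to_severity_py_alt (vector : String) : Option String :=
  if vector = "" ∨ PySem.Str.startswith vector "CVSS:" = false then none
  else
    let score : Int :=
      ((pvMetricsB vector).items.map (fun item => pvPoints.getD item 0)).sum
    match pvLevels.find? (fun tl => score ≥ tl.1) with
    | some tl => some tl.2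
    | none => some "UNKNOWN"

-- ===== PRECONDITION & SPEC =====
def Spec_cvss_vector_to_severity_py (vector : String) (out : Option String) : Prop := out = cvss_vector_to_severity_py_alt vector
instance (vector : String) (out : Option String) : Decidable (Spec_cvss_vector_to_severity_py vector out) := by unfold Spec_cvss_vector_to_severity_py; infer_instance

-- ===== CLAIM (what is proved, stated in full; the proofs are below) =====
def Claim_equal_cvss_vector_to_severity_py : Prop := ∀ (vector : String), Dom_cvss_vector_to_severity_py vector → Spec_cvss_vector_to_severity_py vector (cvss_vector_to_severity_py vector)

-- ===== LEMMAS AND PROOFS =====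

lemma pvGet_cons (k j : String) (v : String) (t : List (String × String)) :
    (PySem.Dict.mk ((k,v)::t) : PySem.Dict String String).get? j
      = if k = j then some v else (PySem.Dict.mk t).get? j := by
  by_cases h : k = j
  · subst h; simp [PySem.Dict.get?]
  · simp [PySem.Dict.get?, beq_eq_false_iff_ne.mpr h, h]

lemma pvGet_none (j : String) (t : List (String × String)) (h : j ∉ t.map Prod.fst) :
    (PySem.Dict.mk t : PySem.Dict String String).get? j = none := by
  simp only [PySem.Dict.get?]
  rw [Option.map_eq_none_iff, List.find?_eq_none]
  rintro ⟨a, b⟩ hp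
  simp only [beq_iff_eq]
  rintro rfl
  exact h (List.mem_map.mpr ⟨(a, b), hp, rfl⟩)

lemma pvGetD_cons (k j : String) (v : String) (t : List (String × String)) (dflt : String) :
    (PySem.Dict.mk ((k,v)::t) : PySem.Dict String String).getD j dflt
      = if k = j then v else (PySem.Dict.mk t).getD j dflt := by
  rw [PySem.Dict.getD_eq_get?_getD, PySem.Dict.getD_eq_get?_getD, pvGet_cons]
  by_cases h : k = j <;> simp [h]

lemma pvGetD_none (j : String) (t : List (String × String)) (dflt : String)
    (h : j ∉ t.map Prod.fst) :
    (PySem.Dict.mk t : PySem.Dict String String).getD j dflt = dflt := by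
  rw [PySem.Dict.getD_eq_get?_getD, pvGet_none _ _ h]
  rfl

lemma pvPoints_eq : pvPoints = PySem.Dict.mk
    [(("C", "L"), 1), (("C", "H"), 3), (("I", "L"), 1), (("I", "H"), 3),
     (("A", "L"), 1), (("A", "H"), 3), (("AV", "N"), 2), (("PR", "N"), 1), (("AC", "L"), 1)] := by
  decide

lemma ivVal (v : String) :
    (PySem.Dict.ofList [("N", (0:Int)), ("L", 1), ("H", 3)]).getD v 0
      = if v = "L" then 1 else if v = "H" then 3 else 0 := by
  have h : PySem.Dict.ofList [("N", (0:Int)), ("L", 1), ("H", 3)]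
      = PySem.Dict.mk [("N", (0:Int)), ("L", 1), ("H", 3)] := by decide
  rw [h]
  by_cases h1 : v = "L" <;> by_cases h2 : v = "H" <;> by_cases h3 : v = "N" <;>
    simp_all [PySem.Dict.getD, PySem.Dict.get?, List.find?, beq_eq_decide, eq_comm]

lemma ptsCIA (p v : String) (hp : p = "C" ∨ p = "I" ∨ p = "A") :
    pvPoints.getD (p, v) 0 = if v = "L" then 1 else if v = "H" then 3 else 0 := by
  rw [pvPoints_eq]
  rcases hp with rfl | rfl | rfl <;>
    by_cases h1 : v = "L" <;> by_cases h2 : v = "H" <;>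
      simp_all [PySem.Dict.getD, PySem.Dict.get?, List.find?, beq_eq_decide, Prod.mk.injEq, eq_comm]

lemma ptsAdj (p w : String) (n : Int)
    (hp : (p = "AV" ∧ w = "N" ∧ n = 2) ∨ (p = "PR" ∧ w = "N" ∧ n = 1) ∨ (p = "AC" ∧ w = "L" ∧ n = 1))
    (v : String) :
    pvPoints.getD (p, v) 0 = if v = w then n else 0 := by
  rw [pvPoints_eq]
  obtain ⟨rfl, rfl, rfl⟩ | ⟨rfl, rfl, rfl⟩ | ⟨rfl, rfl, rfl⟩ := hp <;>
    by_cases h1 : v = "N" <;> by_cases h2 : v = "L" <;>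
      simp_all [PySem.Dict.getD, PySem.Dict.get?, List.find?, beq_eq_decide, Prod.mk.injEq, eq_comm]

lemma ptsOther (k v : String) (hC : k ≠ "C") (hI : k ≠ "I") (hA : k ≠ "A")
    (hAV : k ≠ "AV") (hPR : k ≠ "PR") (hAC : k ≠ "AC") :
    pvPoints.getD (k, v) 0 = 0 := by
  rw [pvPoints_eq]
  simp_all [PySem.Dict.getD, PySem.Dict.get?, List.find?, beq_eq_decide, Prod.mk.injEq, eq_comm]

-- one item (k, v) of a duplicate-free metrics list contributes exactly its table points to A's score
set_option maxHeartbeats 1600000 in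
lemma pvStep (k v : String) (t : List (String × String)) (hk : k ∉ t.map Prod.fst) :
    pvScoreA ⟨(k,v)::t⟩ = pvPoints.getD (k,v) 0 + pvScoreA ⟨t⟩ := by
  by_cases hC : k = "C"
  · subst hC
    rw [ptsCIA _ v (Or.inl rfl)]
    simp only [pvScoreA, List.foldl]
    simp only [pvGetD_cons, pvGetD_none _ _ _ hk, pvGet_cons, ivVal]
    simp
    split_ifs <;> omega
  · by_cases hI : k = "I"
    · subst hI
      rw [ptsCIA _ v (Or.inr (Or.inl rfl))]
      simp only [pvScoreA, List.foldl]
      simp only [pvGetD_cons, pvGetD_none _ _ _ hk, pvGet_cons, ivVal]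
      simp
      split_ifs <;> omega
    · by_cases hA : k = "A"
      · subst hA
        rw [ptsCIA _ v (Or.inr (Or.inr rfl))]
        simp only [pvScoreA, List.foldl]
        simp only [pvGetD_cons, pvGetD_none _ _ _ hk, pvGet_cons, ivVal]
        simp
        split_ifs <;> omega
      · by_cases hAV : k = "AV"
        · subst hAV
          rw [ptsAdj _ _ _ (Or.inl ⟨rfl, rfl, rfl⟩) v]
          simp only [pvScoreA, List.foldl]
          simp only [pvGetD_cons, pvGet_cons, pvGet_none _ _ hk, ivVal]
          simp
          split_ifs <;> omega
        · by_cases hPR : k = "PR"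
          · subst hPR
            rw [ptsAdj _ _ _ (Or.inr (Or.inl ⟨rfl, rfl, rfl⟩)) v]
            simp only [pvScoreA, List.foldl]
            simp only [pvGetD_cons, pvGet_cons, pvGet_none _ _ hk, ivVal]
            simp
            split_ifs <;> omega
          · by_cases hAC : k = "AC"
            · subst hAC
              rw [ptsAdj _ _ _ (Or.inr (Or.inr ⟨rfl, rfl, rfl⟩)) v]
              simp only [pvScoreA, List.foldl]
              simp only [pvGetD_cons, pvGet_cons, pvGet_none _ _ hk, ivVal]
              simp
              split_ifs <;> omega
            · rw [ptsOther k v hC hI hA hAV hPR hAC]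
              simp only [pvScoreA, List.foldl]
              simp only [pvGetD_cons, pvGet_cons,
                if_neg hC, if_neg hI, if_neg hA, if_neg hAV, if_neg hPR, if_neg hAC]
              omega

-- A's heuristic score equals the table-sum over the items, for duplicate-free keys
lemma pvScore_eq (l : List (String × String)) (h : (l.map Prod.fst).Nodup) :
    pvScoreA ⟨l⟩ = (l.map (fun item => pvPoints.getD item 0)).sum := by
  induction l with
  | nil => decide
  | cons p t ih =>
    obtain ⟨k, v⟩ := p
    simp only [List.map_cons, List.nodup_cons] at h
    rw [List.map_cons, List.sum_cons, ← ih h.2, pvStep k v t h.1]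

-- the parse loop keeps the keys duplicate-free
lemma pvParse_nodup (parts : List String) (d : PySem.Dict String String)
    (h : d.keys.Nodup) :
    ((parts.foldl (fun m part =>
      if PySem.Str.isIn ":" part then
        match PySem.Str.splitMax? part ":" 1 with
        | some (key :: val :: _) => m.insert key val
        | _ => m
      else m) d).keys).Nodup := by
  induction parts generalizing d with
  | nil => exact h
  | cons p t ih =>
    simp only [List.foldl_cons]
    apply ih
    split
    · split
      · exact PySem.Dict.nodup_keys_insert _ _ _ h
      · exact h
    · exact h

-- A's if/elif threshold chain is B's first-match scan of pvLevels
lemma pvLevels_eq (s : Int) :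
    (if s ≥ 10 then some "CRITICAL"
     else if s ≥ 7 then some "HIGH"
     else if s ≥ 4 then some "MEDIUM"
     else if s ≥ 1 then some "LOW"
     else some "UNKNOWN")
      = (match pvLevels.find? (fun tl => s ≥ tl.1) with
         | some tl => some tl.2
         | none => (some "UNKNOWN" : Option String)) := by
  by_cases h10 : s ≥ 10 <;> by_cases h7 : s ≥ 7 <;> by_cases h4 : s ≥ 4 <;> by_cases h1 : s ≥ 1 <;>
    simp [pvLevels, List.find?, h10, h7, h4, h1]

-- ===== VERDICT (by name: the statement is the Claim_ definition above) =====
theorem cvss_vector_to_severity_py_spec : Claim_equal_cvss_vector_to_severity_py := by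
  intro vector _
  unfold Spec_cvss_vector_to_severity_py cvss_vector_to_severity_py cvss_vector_to_severity_py_alt
  by_cases hg : vector = "" ∨ PySem.Str.startswith vector "CVSS:" = false
  · rw [if_pos hg, if_pos hg]
  · rw [if_neg hg, if_neg hg]
    have hnd : (pvMetricsA vector).keys.Nodup :=
      pvParse_nodup _ PySem.Dict.empty (by simp [PySem.Dict.keys, PySem.Dict.empty])
    rw [show pvMetricsB vector = pvMetricsA vector from rfl]
    generalize hM : pvMetricsA vector = d
    rw [hM] at hnd
    obtain ⟨l⟩ := d
    simp only [PySem.Dict.keys] at hnd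
    rw [show (PySem.Dict.mk l : PySem.Dict String String).items = l from rfl]
    rw [pvScore_eq l hnd]
    exact pvLevels_eq _
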